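-- pv_equiv track=rewrite | github.com/daniel-reich/turbo-robot | MvtxpxtFDrzEtA9k5_2.py | palindrome_descendant
-- ===== SOURCE A (Python) =====
-- def palindrome_descendant(num):
--   def is_palin(num): return all([str(num)[i] == str(num)[-i - 1] for i in range(int(len(str(num)) / 2))])
--   num = str(num)
--   while len(num) >= 2:
--     if is_palin(int(num)):
--       return True
--     if len(num) % 2 == 1 or len(num) == 2:
--       break
--     new_num = ''
--     for i in range(1, len(num), 2):
--       new_num += str(int(num[i]) + int(num[i - 1]))
--     num = new_num
--   return False
-- ===== SOURCE B (Python) =====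
-- def palindrome_descendant(num):
--     def go(s):
--         if len(s) < 2:
--             return False
--         t = str(int(s))
--         if t == t[::-1]:
--             return True
--         if len(s) % 2 == 1 or len(s) == 2:
--             return False
--         nxt = ''.join(str(int(s[i - 1]) + int(s[i])) for i in range(1, len(s), 2))
--         return go(nxt)
--     return go(str(num))
-- ===== Notes on version B (the rewrite author's own statement) =====
-- stated objective: alternative
-- what changed: Replaces A's flat while-loop by the natural self-recursion on the descendant string, checks palindromes by whole-string reversal (str(int(s)) == its reverse) instead of A's indexed scan over the first half, and builds the descendant string with ''.join of a comprehension instead of repeated string concatenation.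
import Mathlib
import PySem

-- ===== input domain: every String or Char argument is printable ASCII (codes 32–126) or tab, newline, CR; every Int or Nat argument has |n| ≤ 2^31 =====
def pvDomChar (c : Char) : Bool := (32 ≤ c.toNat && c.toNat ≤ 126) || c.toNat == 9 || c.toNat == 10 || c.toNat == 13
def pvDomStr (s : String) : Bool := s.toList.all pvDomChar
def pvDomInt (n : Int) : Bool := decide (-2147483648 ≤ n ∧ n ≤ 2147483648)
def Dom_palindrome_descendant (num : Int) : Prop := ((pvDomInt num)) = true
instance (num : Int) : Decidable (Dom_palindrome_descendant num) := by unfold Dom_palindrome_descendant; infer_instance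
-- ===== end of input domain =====

-- B replaces A's flat while-loop by the natural self-recursion of the 'descendant' definition,
-- checks palindromes by whole-string reversal instead of A's indexed half-scan, and builds the
-- descendant string as a join of a comprehension instead of repeated concatenation (objective: alternative).

-- shared primitive helpers (int(s) and int(s[i]) with Python's raise modelled as default 0;
-- the defaulted cases are exactly the inputs Pre_ excludes)
def pdStrInt (s : List Char) : Int := (PySem.Int.ofChars? s).getD 0
def pdDigit (s : List Char) (i : Int) : Int :=
  ((PySem.List.pyGet? s i).bind (fun c => PySem.Int.ofChars? [c])).getD 0

-- ===== PORT A =====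
-- is_palin: all([str(num)[i] == str(num)[-i-1] for i in range(int(len(str(num))/2))])
-- (int(len/2) on a nonnegative length is floor division)
def pdIsPalin (n : Int) : Bool :=
  let s := (PySem.Int.toStr n).toList
  ((PySem.List.pyRange 0 (PySem.Int.floordiv (s.length : Int) 2) 1).map
    (fun i => PySem.List.pyGet? s i == PySem.List.pyGet? s (-i - 1))).all id

-- the while-loop; fuel 100 is ample: within Dom the string has ≤ 11 chars and its length
-- never increases from one iteration to the next
def pdLoopA : Nat → List Char → Bool
  | 0, _ => false
  | fuel + 1, num =>
    if 2 ≤ num.length then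
      if pdIsPalin (pdStrInt num) then true
      else if num.length % 2 == 1 || num.length == 2 then false
      else
        pdLoopA fuel
          ((PySem.List.pyRange 1 (num.length : Int) 2).foldl
            (fun acc i => acc ++ (PySem.Int.toStr (pdDigit num i + pdDigit num (i - 1))).toList) [])
    else false

def palindrome_descendant (num : Int) : Bool :=
  pdLoopA 100 (PySem.Int.toStr num).toList

-- ===== PORT B =====
def pdGoB : Nat → List Char → Bool
  | 0, _ => false
  | fuel + 1, s =>
    if s.length < 2 then false
    else
      let t := (PySem.Int.toStr (pdStrInt s)).toList
      if t == t.reverse then true   -- t == t[::-1]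
      else if s.length % 2 == 1 || s.length == 2 then false
      else
        pdGoB fuel
          (((PySem.List.pyRange 1 (s.length : Int) 2).map
            (fun i => (PySem.Int.toStr (pdDigit s (i - 1) + pdDigit s i)).toList)).flatten)

def palindrome_descendant_alt (num : Int) : Bool :=
  pdGoB 100 (PySem.Int.toStr num).toList

-- ===== PRECONDITION & SPEC =====
-- Pre_ excludes exactly the inputs on which A raises ValueError (int('-') while building the
-- descendant of a negative number whose decimal string has even length); B raises there too.
def Pre_palindrome_descendant (num : Int) : Prop :=
  ¬ (num ≤ -100 ∧ (PySem.Int.toStr num).toList.length % 2 = 0)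
instance (num : Int) : Decidable (Pre_palindrome_descendant num) := by
  unfold Pre_palindrome_descendant; infer_instance

def pvWitness_palindrome_descendant : Int := 1997

def Spec_palindrome_descendant (num : Int) (out : Bool) : Prop := out = palindrome_descendant_alt num
instance (num : Int) (out : Bool) : Decidable (Spec_palindrome_descendant num out) := by
  unfold Spec_palindrome_descendant; infer_instance

-- ===== CLAIM (what is proved, stated in full; the proofs are below) =====
def Claim_equal_palindrome_descendant : Prop := ∀ (num : Int), Dom_palindrome_descendant num → Pre_palindrome_descendant num → Spec_palindrome_descendant num (palindrome_descendant num)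

-- ===== LEMMAS AND PROOFS =====

-- A's indexed half-scan over a list equals the whole-list reversal test.
theorem pdHalfScan (l : List Char) :
    ((PySem.List.pyRange 0 (PySem.Int.floordiv (l.length : Int) 2) 1).map
      (fun i => PySem.List.pyGet? l i == PySem.List.pyGet? l (-i - 1))).all id
      = (l == l.reverse) := by
  have hfd : PySem.Int.floordiv (l.length : Int) 2 = ((l.length / 2 : Nat) : Int) := by
    exact_mod_cast PySem.Int.floordiv_natCast l.length 2
  rw [hfd, Bool.eq_iff_iff]
  rw [PySem.List.pyRange_zero_nat]
  simp only [List.all_map, List.all_eq_true, List.mem_range, Function.comp_apply, id_eq, beq_iff_eq]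
  constructor
  · intro h
    apply List.ext_getElem?
    intro i
    by_cases hi : i < l.length
    · rw [List.getElem?_reverse hi]
      by_cases hh : i < l.length / 2
      · have := h _ hh
        rw [show (-(i:Int)-1) = -(((i+1:Nat)):Int) by push_cast; ring,
          PySem.List.pyGet?_neg_natCast _ _ (by omega) (by omega),
          PySem.List.pyGet?_natCast] at this
        simpa [show l.length - (i+1) = l.length - 1 - i by omega] using this
      · by_cases hj : l.length - 1 - i < l.length / 2
        · have := h _ hj
          rw [show (-((l.length-1-i : Nat):Int)-1) = -((((l.length-1-i)+1:Nat)):Int) by push_cast; ring,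
            PySem.List.pyGet?_neg_natCast _ _ (by omega) (by omega),
            PySem.List.pyGet?_natCast] at this
          rw [show l.length - (l.length - 1 - i + 1) = i by omega] at this
          exact this.symm
        · rw [show l.length - 1 - i = i by omega]
    · rw [List.getElem?_eq_none (by omega), List.getElem?_eq_none (by simp; omega)]
  · intro h i hi
    rw [show (-(i:Int)-1) = -(((i+1:Nat)):Int) by push_cast; ring,
      PySem.List.pyGet?_neg_natCast _ _ (by omega) (by omega),
      PySem.List.pyGet?_natCast]
    conv_rhs => rw [show l.length - (i+1) = l.length - 1 - i by omega, ← List.getElem?_reverse (by omega), ← h]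

-- A's half-scan palindrome test equals B's whole-string-reversal test (both on str(int(s))).
theorem pdIsPalin_eq_reverse (n : Int) :
    pdIsPalin n = ((PySem.Int.toStr n).toList == (PySem.Int.toStr n).toList.reverse) := by
  simp only [pdIsPalin]
  exact pdHalfScan _

-- A's concatenation loop builds the same descendant string as B's flattened comprehension.
theorem pdNext_eq (s : List Char) :
    (PySem.List.pyRange 1 (s.length : Int) 2).foldl
      (fun acc i => acc ++ (PySem.Int.toStr (pdDigit s i + pdDigit s (i - 1))).toList) [] =
    ((PySem.List.pyRange 1 (s.length : Int) 2).map
      (fun i => (PySem.Int.toStr (pdDigit s (i - 1) + pdDigit s i)).toList)).flatten := by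
  rw [PySem.List.foldl_append_eq_flatMap]
  simp [List.flatMap_def, Int.add_comm]

theorem pdLoopA_eq_pdGoB (fuel : Nat) (s : List Char) : pdLoopA fuel s = pdGoB fuel s := by
  induction fuel generalizing s with
  | zero => rfl
  | succ fuel ih =>
    simp only [pdLoopA, pdGoB, pdIsPalin_eq_reverse, pdNext_eq, ih]
    by_cases h : 2 ≤ s.length
    · rw [if_pos h, if_neg (show ¬ s.length < 2 by omega)]
    · rw [if_neg h, if_pos (show s.length < 2 by omega)]

-- ===== VERDICT (by name: the statement is the Claim_ definition above) =====
theorem palindrome_descendant_spec : Claim_equal_palindrome_descendant := by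
  intro num _ _
  unfold Spec_palindrome_descendant palindrome_descendant palindrome_descendant_alt
  exact pdLoopA_eq_pdGoB 100 _
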